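-- pv_equiv track=rewrite | github.com/sam4410/From-Logs-to-JIRA-A-Multi-Agent-AI-System-for-Operational-Workflows | tools/log_tools.py | _is_error_line
-- ===== SOURCE A (Python) =====
-- def _is_error_line(line: str) -> bool:
--     """Check if line contains error indicators"""
--     error_keywords = [
--         'error', 'exception', 'failed', 'failure', 'timeout',
--         'null pointer', 'connection refused', 'out of memory',
--         'stack trace', 'fatal', 'critical', 'alert'
--     ]
--
--     line_lower = line.lower()
--     return any(keyword in line_lower for keyword in error_keywords)
-- ===== SOURCE B (Python) =====
-- _ERROR_KEYWORDS = (
--     'error', 'exception', 'failed', 'failure', 'timeout',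
--     'null pointer', 'connection refused', 'out of memory',
--     'stack trace', 'fatal', 'critical', 'alert'
-- )
--
--
-- def _is_error_line(line: str) -> bool:
--     """Single left-to-right pass: at each position, test whether any keyword
--     starts there, instead of twelve independent substring scans."""
--     s = line.lower()
--     return any(s.startswith(_ERROR_KEYWORDS, i) for i in range(len(s) + 1))
-- ===== Notes on version B (the rewrite author's own statement) =====
-- stated objective: alternative
-- what changed: Replaced twelve independent per-keyword substring scans by a single left-to-right pass over the lowered line that tests at each position whether any keyword starts there (str.startswith with a keyword tuple and a position).
import Mathlib
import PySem

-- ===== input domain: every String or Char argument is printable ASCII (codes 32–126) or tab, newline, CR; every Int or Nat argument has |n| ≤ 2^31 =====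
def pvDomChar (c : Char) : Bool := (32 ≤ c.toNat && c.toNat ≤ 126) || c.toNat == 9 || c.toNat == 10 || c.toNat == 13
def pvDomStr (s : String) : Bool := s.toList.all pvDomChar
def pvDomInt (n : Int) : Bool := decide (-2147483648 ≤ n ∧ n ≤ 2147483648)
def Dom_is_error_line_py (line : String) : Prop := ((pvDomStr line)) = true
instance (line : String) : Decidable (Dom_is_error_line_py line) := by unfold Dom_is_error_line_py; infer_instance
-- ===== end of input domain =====

-- B replaces A's twelve independent substring scans by one left-to-right pass
-- that tests at each position whether any keyword starts there (alternative, same cost class).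

-- ===== PORT A =====
-- the error_keywords list local to A
def pvAKeywords : List String :=
  ["error", "exception", "failed", "failure", "timeout",
   "null pointer", "connection refused", "out of memory",
   "stack trace", "fatal", "critical", "alert"]

def is_error_line_py (line : String) : Bool :=
  let line_lower := PySem.Str.lower line
  pvAKeywords.any (fun keyword => PySem.Str.isIn keyword line_lower)

-- ===== PORT B =====
-- B's keyword tuple, as char lists (B scans character positions)
def pvBKeywords : List (List Char) :=
  ["error".toList, "exception".toList, "failed".toList, "failure".toList, "timeout".toList,
   "null pointer".toList, "connection refused".toList, "out of memory".toList,
   "stack trace".toList, "fatal".toList, "critical".toList, "alert".toList]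

-- the generator 'any(s.startswith(KEYWORDS, i) for i in range(len(s)+1))':
-- walk the suffixes of s (positions i = 0 … len), testing the keyword tuple at each
def pvScan : List Char → Bool
  | [] => pvBKeywords.any (fun k => k.isPrefixOf [])
  | c :: rest => pvBKeywords.any (fun k => k.isPrefixOf (c :: rest)) || pvScan rest

def is_error_line_py_alt (line : String) : Bool :=
  pvScan (PySem.Str.lower line).toList

-- ===== PRECONDITION & SPEC =====
def Spec_is_error_line_py (line : String) (out : Bool) : Prop := out = is_error_line_py_alt line
instance (line : String) (out : Bool) : Decidable (Spec_is_error_line_py line out) := by unfold Spec_is_error_line_py; infer_instance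

-- ===== CLAIM (what is proved, stated in full; the proofs are below) =====
def Claim_equal_is_error_line_py : Prop := ∀ (line : String), Dom_is_error_line_py line → Spec_is_error_line_py line (is_error_line_py line)

-- ===== LEMMAS AND PROOFS =====

-- the position scan decides exactly "some keyword is an infix"
theorem pvScan_eq_any_isIn (s : List Char) :
    pvScan s = pvBKeywords.any (fun k => PySem.Chars.isIn k s) := by
  induction s with
  | nil =>
    rw [pvScan, Bool.eq_iff_iff]
    simp only [List.any_eq_true]
    constructor <;> rintro ⟨k, hk, h⟩ <;> refine ⟨k, hk, ?_⟩
    · rw [PySem.Chars.isIn_iff_infix]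
      exact (List.isPrefixOf_iff_prefix.mp h).isInfix
    · rw [List.isPrefixOf_iff_prefix]
      rw [PySem.Chars.isIn_iff_infix] at h
      simpa using h
  | cons c rest ih =>
    rw [pvScan, ih, Bool.eq_iff_iff]
    simp only [Bool.or_eq_true, List.any_eq_true,
      List.isPrefixOf_iff_prefix, PySem.Chars.isIn_iff_infix]
    constructor
    · rintro (⟨k, hk, h⟩ | ⟨k, hk, h⟩)
      · exact ⟨k, hk, h.isInfix⟩
      · exact ⟨k, hk, List.infix_cons h⟩
    · rintro ⟨k, hk, h⟩
      rcases (List.infix_cons_iff.mp h) with h' | h'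
      · exact Or.inl ⟨k, hk, h'⟩
      · exact Or.inr ⟨k, hk, h'⟩

-- ===== VERDICT (by name: the statement is the Claim_ definition above) =====
theorem is_error_line_py_spec : Claim_equal_is_error_line_py := by
  intro line _
  unfold Spec_is_error_line_py is_error_line_py is_error_line_py_alt
  rw [pvScan_eq_any_isIn]
  show pvAKeywords.any _ = pvBKeywords.any _
  have h : pvBKeywords = pvAKeywords.map String.toList := rfl
  rw [h, List.any_map]
  rfl
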